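-- pv_equiv track=rewrite | github.com/mohammadfaiizan/ProjectI | DSA/Problem/Graph/02_Depth_First_Search_DFS/1111_Maximum_Nesting_Depth_of_Two_Valid_Parentheses_Strings.py | maxDepthAfterSplit_depth_tracking
-- ===== SOURCE A (Python) =====
-- from typing import List
--
-- def maxDepthAfterSplit_depth_tracking(seq: str) -> List[int]:
--     """
--     Approach 2: Depth Tracking with Balanced Assignment
--
--     Track depth and assign to maintain balance between A and B.
--
--     Time: O(n), Space: O(1)
--     """
--     result = []
--     depth_a = 0  # Current depth in subsequence A
--     depth_b = 0  # Current depth in subsequence B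
--
--     for char in seq:
--         if char == '(':
--             # Assign to subsequence with smaller current depth
--             if depth_a <= depth_b:
--                 result.append(0)  # Assign to A
--                 depth_a += 1
--             else:
--                 result.append(1)  # Assign to B
--                 depth_b += 1
--         else:  # char == ')'
--             # Match with corresponding opening parenthesis
--             if depth_a > depth_b:
--                 result.append(0)  # Close in A
--                 depth_a -= 1
--             else:
--                 result.append(1)  # Close in B
--                 depth_b -= 1
--
--     return result
-- ===== SOURCE B (Python) =====
-- from typing import List
--
-- def maxDepthAfterSplit_depth_tracking(seq: str) -> List[int]:
--     """Single running nesting depth; each parenthesis is labelled by the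
--     complement of the parity of its nesting level (level-even -> 1, level-odd -> 0)."""
--     result = []
--     depth = 0
--     for char in seq:
--         if char == '(':
--             depth += 1
--             result.append(1 - depth % 2)
--         else:
--             result.append(1 - depth % 2)
--             depth -= 1
--     return result
-- ===== Notes on version B (the rewrite author's own statement) =====
-- stated objective: simpler
-- what changed: Replaces the two per-subsequence depth counters and their comparisons with one running depth: each parenthesis is labelled by the complement of its nesting-level parity (1 - depth % 2).
import Mathlib
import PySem

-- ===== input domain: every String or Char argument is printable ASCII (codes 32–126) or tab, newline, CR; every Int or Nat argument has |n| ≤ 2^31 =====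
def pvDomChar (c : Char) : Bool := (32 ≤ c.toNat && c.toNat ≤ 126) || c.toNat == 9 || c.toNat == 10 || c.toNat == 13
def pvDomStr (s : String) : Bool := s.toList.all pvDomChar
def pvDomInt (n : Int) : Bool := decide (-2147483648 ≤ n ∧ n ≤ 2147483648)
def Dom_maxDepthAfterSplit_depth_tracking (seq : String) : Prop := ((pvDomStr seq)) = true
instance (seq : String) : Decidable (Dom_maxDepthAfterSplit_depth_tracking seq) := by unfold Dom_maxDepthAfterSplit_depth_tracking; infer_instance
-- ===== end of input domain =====

-- B keeps one running depth and labels each parenthesis by the complement of its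
-- nesting-level parity, instead of A's two per-subsequence depth counters (objective: simpler).
-- ===== PORT A =====
def pvStepA : (List Int × Int × Int) → Char → (List Int × Int × Int)
  | (res, da, db), c =>
    if c = '(' then
      if da ≤ db then (res ++ [0], da + 1, db) else (res ++ [1], da, db + 1)
    else
      if da > db then (res ++ [0], da - 1, db) else (res ++ [1], da, db - 1)

def maxDepthAfterSplit_depth_tracking (seq : String) : List Int :=
  (seq.toList.foldl pvStepA ([], 0, 0)).1

-- ===== PORT B =====
def pvStepB : (List Int × Int) → Char → (List Int × Int)
  | (res, d), c =>
    if c = '(' then (res ++ [1 - (d + 1) % 2], d + 1)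
    else (res ++ [1 - d % 2], d - 1)

def maxDepthAfterSplit_depth_tracking_alt (seq : String) : List Int :=
  (seq.toList.foldl pvStepB ([], 0)).1

-- ===== PRECONDITION & SPEC =====
def Spec_maxDepthAfterSplit_depth_tracking (seq : String) (out : List Int) : Prop := out = maxDepthAfterSplit_depth_tracking_alt seq
instance (seq : String) (out : List Int) : Decidable (Spec_maxDepthAfterSplit_depth_tracking seq out) := by unfold Spec_maxDepthAfterSplit_depth_tracking; infer_instance

-- ===== CLAIM (what is proved, stated in full; the proofs are below) =====
def Claim_equal_maxDepthAfterSplit_depth_tracking : Prop := ∀ (seq : String), Dom_maxDepthAfterSplit_depth_tracking seq → Spec_maxDepthAfterSplit_depth_tracking seq (maxDepthAfterSplit_depth_tracking seq)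

-- ===== LEMMAS AND PROOFS =====
-- Invariant: A's pair (da, db) and B's single depth d satisfy da + db = d and da - db = d % 2.
theorem pv_fold_eq (l : List Char) : ∀ (res : List Int) (da db d : Int),
    da + db = d → da - db = d % 2 →
    (l.foldl pvStepA (res, da, db)).1 = (l.foldl pvStepB (res, d)).1 := by
  induction l with
  | nil => intro res da db d _ _; rfl
  | cons c t ih =>
    intro res da db d hsum hdiff
    simp only [List.foldl_cons, pvStepA, pvStepB]
    by_cases hc : c = '('
    · subst hc; rw [if_pos rfl, if_pos rfl]
      by_cases hle : da ≤ db
      · rw [if_pos hle]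
        have h0 : (1 : Int) - (d + 1) % 2 = 0 := by omega
        rw [h0]
        exact ih _ _ _ _ (by omega) (by omega)
      · rw [if_neg hle]
        have h1 : (1 : Int) - (d + 1) % 2 = 1 := by omega
        rw [h1]
        exact ih _ _ _ _ (by omega) (by omega)
    · rw [if_neg hc, if_neg hc]
      by_cases hgt : da > db
      · rw [if_pos hgt]
        have h0 : (1 : Int) - d % 2 = 0 := by omega
        rw [h0]
        exact ih _ _ _ _ (by omega) (by omega)
      · rw [if_neg hgt]
        have h1 : (1 : Int) - d % 2 = 1 := by omega
        rw [h1]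
        exact ih _ _ _ _ (by omega) (by omega)

-- ===== VERDICT (by name: the statement is the Claim_ definition above) =====
theorem maxDepthAfterSplit_depth_tracking_spec : Claim_equal_maxDepthAfterSplit_depth_tracking := by
  intro seq _
  unfold Spec_maxDepthAfterSplit_depth_tracking maxDepthAfterSplit_depth_tracking maxDepthAfterSplit_depth_tracking_alt
  exact pv_fold_eq _ _ 0 0 0 rfl rfl
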